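-- pv_equiv track=rewrite | github.com/wnkAI/DLcatalysis4 | scripts/00_tag_natural_substrate.py | is_natural_match
-- ===== SOURCE A (Python) =====
-- def is_natural_match(csv_set: frozenset, nsp_sets) -> bool:
--     """Return True if csv_set shares meaningful overlap with any NSP set.
--     Matching rule: non-empty intersection with csv_set that covers at least one
--     non-cofactor substrate from csv_set (or NSP set is a subset of csv_set / vice versa).
--     """
--     if not csv_set:
--         return False
--     for nsp in nsp_sets:
--         if not nsp:
--             continue
--         if csv_set == nsp:
--             return True
--         if csv_set.issubset(nsp) or nsp.issubset(csv_set):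
--             return True
--         # token-level fuzzy: at least one main substrate matches exactly
--         inter = csv_set & nsp
--         if inter:
--             return True
--     return False
-- ===== SOURCE B (Python) =====
-- def is_natural_match(csv_set: frozenset, nsp_sets) -> bool:
--     """Pool every element of every NSP set, then do one intersection test."""
--     pool = set()
--     for nsp in nsp_sets:
--         pool |= nsp
--     return bool(csv_set & pool)
-- ===== Notes on version B (the rewrite author's own statement) =====
-- stated objective: simpler
-- what changed: A scans each NSP set separately with equality/subset/intersection branches that all reduce to 'nonempty intersection'; B first builds one pooled union of all NSP elements and then performs a single intersection test against csv_set.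
import Mathlib
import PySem

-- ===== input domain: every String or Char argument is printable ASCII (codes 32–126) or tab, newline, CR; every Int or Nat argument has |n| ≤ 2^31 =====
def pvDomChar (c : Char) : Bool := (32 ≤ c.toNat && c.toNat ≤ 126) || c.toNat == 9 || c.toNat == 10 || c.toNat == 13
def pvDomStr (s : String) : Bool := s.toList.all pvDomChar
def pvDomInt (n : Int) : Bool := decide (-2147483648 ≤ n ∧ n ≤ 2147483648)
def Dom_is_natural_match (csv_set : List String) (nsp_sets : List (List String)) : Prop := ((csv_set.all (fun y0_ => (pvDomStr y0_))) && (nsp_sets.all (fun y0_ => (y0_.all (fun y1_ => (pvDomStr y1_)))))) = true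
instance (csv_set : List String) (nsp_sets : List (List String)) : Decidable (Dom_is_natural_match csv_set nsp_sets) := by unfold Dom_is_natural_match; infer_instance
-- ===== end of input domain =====

-- B replaces A's per-set scan (equality/subset/intersection branches, all equivalent to a nonempty
-- intersection) with one pooled union of all NSP elements followed by a single intersection test (simpler).


-- ===== PORT A =====
-- loop of A: per NSP set, skip empty, then equality / subset / intersection branches
def pvALoop (csv_set : List String) : List (List String) → Bool
  | [] => false
  | nsp :: rest =>
    if nsp.isEmpty then pvALoop csv_set rest
    else if PySem.Set.equal csv_set nsp then true
    else if PySem.Set.issubset csv_set nsp || PySem.Set.issubset nsp csv_set then true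
    else if !(PySem.Set.inter csv_set nsp).isEmpty then true
    else pvALoop csv_set rest

def is_natural_match (csv_set : List String) (nsp_sets : List (List String)) : Bool :=
  if csv_set.isEmpty then false else pvALoop csv_set nsp_sets

-- ===== PORT B =====
-- B: build one pooled union of all NSP elements, then a single intersection test
def is_natural_match_alt (csv_set : List String) (nsp_sets : List (List String)) : Bool :=
  let pool := nsp_sets.foldl (fun p nsp => PySem.Set.union p nsp) PySem.Set.empty
  !(PySem.Set.inter csv_set pool).isEmpty

-- ===== PRECONDITION & SPEC =====
def Spec_is_natural_match (csv_set : List String) (nsp_sets : List (List String)) (out : Bool) : Prop := out = is_natural_match_alt csv_set nsp_sets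
instance (csv_set : List String) (nsp_sets : List (List String)) (out : Bool) : Decidable (Spec_is_natural_match csv_set nsp_sets out) := by unfold Spec_is_natural_match; infer_instance

-- ===== CLAIM (what is proved, stated in full; the proofs are below) =====
def Claim_equal_is_natural_match : Prop := ∀ (csv_set : List String) (nsp_sets : List (List String)), Dom_is_natural_match csv_set nsp_sets → Spec_is_natural_match csv_set nsp_sets (is_natural_match csv_set nsp_sets)


-- ===== LEMMAS AND PROOFS =====
lemma pvInterNonempty (cs n : List String) :
    (!(PySem.Set.inter cs n).isEmpty) = true ↔ ∃ x, x ∈ cs ∧ x ∈ n := by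
  rw [Bool.not_eq_eq_eq_not, Bool.not_true, List.isEmpty_eq_false_iff_exists_mem]
  constructor
  · rintro ⟨x, hx⟩; exact ⟨x, (PySem.Set.mem_inter cs n x).1 hx⟩
  · rintro ⟨x, hx⟩; exact ⟨x, (PySem.Set.mem_inter cs n x).2 hx⟩

lemma pvALoop_iff (cs : List String) (h : cs ≠ []) (nss : List (List String)) :
    pvALoop cs nss = true ↔ ∃ n ∈ nss, ∃ x, x ∈ cs ∧ x ∈ n := by
  induction nss with
  | nil => simp [pvALoop]
  | cons n rest ih =>
    simp only [pvALoop]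
    split_ifs with hn heq hsub hint
    · have hn' : n = [] := List.isEmpty_iff.mp hn
      subst hn'
      simp [ih]
    · refine ⟨fun _ => ?_, fun _ => rfl⟩
      obtain ⟨x, hx⟩ := List.exists_mem_of_ne_nil cs h
      exact ⟨n, List.mem_cons_self, x, hx, ((PySem.Set.equal_iff cs n).mp heq x).1 hx⟩
    · refine ⟨fun _ => ?_, fun _ => rfl⟩
      rcases Bool.or_eq_true_iff.mp hsub with hs | hs
      · obtain ⟨x, hx⟩ := List.exists_mem_of_ne_nil cs h
        exact ⟨n, List.mem_cons_self, x, hx, (PySem.Set.issubset_iff cs n).mp hs x hx⟩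
      · have hnne : n ≠ [] := fun e => hn (by simp [e])
        obtain ⟨x, hx⟩ := List.exists_mem_of_ne_nil n hnne
        exact ⟨n, List.mem_cons_self, x, (PySem.Set.issubset_iff n cs).mp hs x hx, hx⟩
    · refine ⟨fun _ => ?_, fun _ => rfl⟩
      obtain ⟨x, hx⟩ := (pvInterNonempty cs n).mp hint
      exact ⟨n, List.mem_cons_self, x, hx⟩
    · rw [ih]
      constructor
      · rintro ⟨m, hm, hx⟩; exact ⟨m, List.mem_cons_of_mem n hm, hx⟩
      · rintro ⟨m, hm, x, hxc, hxm⟩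
        rcases List.mem_cons.mp hm with rfl | hm
        · exact absurd ((pvInterNonempty cs m).mpr ⟨x, hxc, hxm⟩) hint
        · exact ⟨m, hm, x, hxc, hxm⟩

lemma pvPoolMem (x : String) (nss : List (List String)) (s : PySem.Set String) :
    x ∈ nss.foldl (fun p nsp => PySem.Set.union p nsp) s ↔ x ∈ s ∨ ∃ n ∈ nss, x ∈ n := by
  induction nss generalizing s with
  | nil => simp
  | cons n rest ih =>
    rw [List.foldl_cons, ih]
    rw [PySem.Set.mem_union s n x]
    constructor
    · rintro ((hs | hn) | ⟨m, hm, hx⟩)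
      · exact Or.inl hs
      · exact Or.inr ⟨n, List.mem_cons_self, hn⟩
      · exact Or.inr ⟨m, List.mem_cons_of_mem n hm, hx⟩
    · rintro (hs | ⟨m, hm, hx⟩)
      · exact Or.inl (Or.inl hs)
      · rcases List.mem_cons.mp hm with rfl | hm
        · exact Or.inl (Or.inr hx)
        · exact Or.inr ⟨m, hm, hx⟩

lemma pvAlt_iff (cs : List String) (nss : List (List String)) :
    is_natural_match_alt cs nss = true ↔ ∃ x, x ∈ cs ∧ ∃ n ∈ nss, x ∈ n := by
  unfold is_natural_match_alt
  rw [pvInterNonempty]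
  constructor
  · rintro ⟨x, hxc, hp⟩
    rcases (pvPoolMem x nss PySem.Set.empty).mp hp with h | h
    · cases h
    · exact ⟨x, hxc, h⟩
  · rintro ⟨x, hxc, h⟩
    exact ⟨x, hxc, (pvPoolMem x nss PySem.Set.empty).mpr (Or.inr h)⟩

-- ===== VERDICT (by name: the statement is the Claim_ definition above) =====
theorem is_natural_match_spec : Claim_equal_is_natural_match := by
  intro cs nss _
  unfold Spec_is_natural_match is_natural_match
  by_cases h : cs.isEmpty
  · have h' : cs = [] := List.isEmpty_iff.mp h
    simp only [h, if_true]
    symm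
    rw [Bool.eq_false_iff, Ne, pvAlt_iff]
    rintro ⟨x, hx, -⟩
    simp [h'] at hx
  · have h' : cs ≠ [] := fun e => h (by simp [e])
    simp only [h, Bool.false_eq_true, if_false]
    rw [Bool.eq_iff_iff, pvALoop_iff cs h', pvAlt_iff]
    constructor
    · rintro ⟨n, hn, x, hxc, hxn⟩; exact ⟨x, hxc, n, hn, hxn⟩
    · rintro ⟨x, hxc, n, hn, hxn⟩; exact ⟨n, hn, x, hxc, hxn⟩
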